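-- pv_equiv track=rewrite | github.com/Milestoneigroup/data-builder | scrapers/map_venues_to_groups.py | street_numbers
-- ===== SOURCE A (Python) =====
-- def street_numbers(address: str) -> list[int]:
--     """
--     Extract leading numeric prefixes from an address.
--     For '252 George St, Sydney NSW 2000', returns [252].
--     For '11/35 Smith St, Sydney NSW 2000', returns [11, 35] (unit number first).
--     Four-digit values (postcodes, years) are excluded.
--     """
--     if not address:
--         return []
--     tokens = address.replace(",", " ").replace("/", " ").split()
--     numbers: list[int] = []
--     for tok in tokens:
--         clean = "".join(c for c in tok if c.isdigit())
--         if clean: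
--             n = int(clean)
--             if n < 1000:
--                 numbers.append(n)
--     return numbers
-- ===== SOURCE B (Python) =====
-- def street_numbers(address: str) -> list[int]:
--     """Single character-level pass: keep a numeric accumulator per token
--     instead of tokenizing, filtering digits and calling int()."""
--     out: list[int] = []
--     cur = None  # numeric value of the digits seen in the current token
--     for c in address:
--         if c.isspace() or c == "," or c == "/":
--             if cur is not None and cur < 1000:
--                 out.append(cur)
--             cur = None
--         elif c.isdigit():
--             cur = (0 if cur is None else cur) * 10 + (ord(c) - 48)
--     if cur is not None and cur < 1000:
--         out.append(cur)
--     return out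
-- ===== Notes on version B (the rewrite author's own statement) =====
-- stated objective: alternative
-- what changed: Replaces the replace/replace/split tokenization plus per-token digit-filter-and-int() with a single character-level pass that keeps a running numeric accumulator per token and flushes it at delimiters and at the end.
import Mathlib
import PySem

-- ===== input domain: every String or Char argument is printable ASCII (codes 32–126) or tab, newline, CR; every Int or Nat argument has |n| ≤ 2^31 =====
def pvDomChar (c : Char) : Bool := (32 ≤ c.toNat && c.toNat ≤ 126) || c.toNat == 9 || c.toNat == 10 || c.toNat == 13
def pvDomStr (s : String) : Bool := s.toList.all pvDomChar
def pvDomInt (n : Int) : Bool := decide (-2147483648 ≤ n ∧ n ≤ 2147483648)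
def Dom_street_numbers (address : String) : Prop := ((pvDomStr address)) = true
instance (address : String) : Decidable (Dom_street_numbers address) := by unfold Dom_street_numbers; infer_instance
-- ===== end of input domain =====

-- B replaces A's replace/replace/split tokenization plus per-token digit-filter-and-int()
-- with a single character-level pass keeping a running numeric accumulator per token.

-- ===== PORT A =====
-- int(clean) is applied by A only to a NONEMPTY string of ASCII digits (clean is the
-- digit-filter of a token), so it is ported by hand as the digit fold below; this is
-- exact on that input set (no sign, whitespace or '_' can occur in clean).
def digitsToInt (ds : List Char) : Int :=
  ds.foldl (fun n c => n * 10 + ((c.toNat : Int) - 48)) 0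

-- the body of A's for-loop over tokens
def pvProcTok (numbers : List Int) (tok : List Char) : List Int :=
  let clean := tok.filter PySem.Chars.isdigit
  if !clean.isEmpty then
    if digitsToInt clean < 1000 then numbers ++ [digitsToInt clean] else numbers
  else numbers

def street_numbers (address : String) : List Int :=
  if address = "" then []
  else
    (PySem.Chars.split₀
      (PySem.Chars.replace (PySem.Chars.replace address.toList [','] [' ']) ['/'] [' '])).foldl
      pvProcTok []

-- ===== PORT B =====
-- flush of Source B: append the accumulator (if any, and < 1000)
def snFlush (out : List Int) (cur : Option Int) : List Int :=
  match cur with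
  | some n => if n < 1000 then out ++ [n] else out
  | none => out

-- the body of Source B's for-loop over characters
def snStep (st : List Int × Option Int) (c : Char) : List Int × Option Int :=
  if PySem.Chars.isspace c || c == ',' || c == '/' then
    (snFlush st.1 st.2, none)
  else if PySem.Chars.isdigit c then
    (st.1, some ((st.2.getD 0) * 10 + ((c.toNat : Int) - 48)))
  else st

def street_numbers_alt (address : String) : List Int :=
  let st := address.toList.foldl snStep ([], none)
  snFlush st.1 st.2

-- ===== PRECONDITION & SPEC =====
def Spec_street_numbers (address : String) (out : List Int) : Prop := out = street_numbers_alt address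
instance (address : String) (out : List Int) : Decidable (Spec_street_numbers address out) := by unfold Spec_street_numbers; infer_instance

-- ===== CLAIM (what is proved, stated in full; the proofs are below) =====
def Claim_equal_street_numbers : Prop := ∀ (address : String), Dom_street_numbers address → Spec_street_numbers address (street_numbers address)

-- ===== LEMMAS AND PROOFS =====

-- the composed effect of the two single-character replaces
def pvRepl (c : Char) : Char := if c == ',' || c == '/' then ' ' else c

-- how Source B's accumulator evolves on a non-delimiter character
def pvDstep (o : Option Int) (c : Char) : Option Int :=
  if PySem.Chars.isdigit c then some ((o.getD 0) * 10 + ((c.toNat : Int) - 48)) else o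

lemma replaceGo_single (a b : Char) (l : List Char) : ∀ (fuel : Nat) (acc : List Char),
    l.length ≤ fuel →
    PySem.Chars.replace.go [a] [b] fuel l acc
      = acc.reverse ++ l.map (fun c => if c == a then b else c) := by
  induction l with
  | nil =>
    intro fuel acc _
    cases fuel <;> simp [PySem.Chars.replace.go]
  | cons c t ih =>
    intro fuel acc h
    cases fuel with
    | zero => simp at h
    | succ f =>
      have hpre : List.isPrefixOf [a] (c :: t) = (a == c) := by
        simp [List.isPrefixOf]
      rw [PySem.Chars.replace.go]
      rw [hpre]
      by_cases hc : a = c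
      · subst hc
        simp only [beq_self_eq_true, if_true, List.length_singleton, List.drop_succ_cons,
          List.drop_zero, List.reverse_singleton, List.singleton_append]
        rw [ih f (b :: acc) (by simpa using Nat.le_of_succ_le_succ h)]
        simp
      · have hc1 : (a == c) = false := by simp [hc]
        have hc2 : (c == a) = false := by simp [Ne.symm hc]
        simp only [hc1, if_false, Bool.false_eq_true]
        rw [ih f (c :: acc) (by simpa using Nat.le_of_succ_le_succ h)]
        simp only [List.map_cons, hc2, Bool.false_eq_true, if_false, List.reverse_cons,
          List.append_assoc, List.cons_append, List.nil_append]

lemma replace_single (a b : Char) (s : List Char) :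
    PySem.Chars.replace s [a] [b] = s.map (fun c => if c == a then b else c) := by
  unfold PySem.Chars.replace
  simpa using replaceGo_single a b s s.length [] (le_refl _)

lemma repl_compose (s : List Char) :
    ((s.map (fun c => if c == ',' then ' ' else c)).map (fun c => if c == '/' then ' ' else c))
      = s.map pvRepl := by
  rw [List.map_map]
  apply List.map_congr_left
  intro c _
  by_cases h1 : c = ','
  · simp [h1, pvRepl]
  · by_cases h2 : c = '/'
    · simp [h2, pvRepl]
    · simp [pvRepl, Function.comp, h1, h2]

lemma splitGo_acc (l : List Char) : ∀ (cur : List Char) (acc : List (List Char)),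
    PySem.Chars.split₀.go l cur acc = acc.reverse ++ PySem.Chars.split₀.go l cur [] := by
  induction l with
  | nil =>
    intro cur acc
    rw [PySem.Chars.split₀.go, PySem.Chars.split₀.go]
    by_cases h : cur.isEmpty <;> simp [h]
  | cons c t ih =>
    intro cur acc
    rw [PySem.Chars.split₀.go, PySem.Chars.split₀.go]
    by_cases hs : PySem.Chars.isspace c
    · by_cases h : cur.isEmpty
      · simp only [hs, h, if_true]
        exact ih [] acc
      · simp only [hs, h, if_true, if_false, Bool.false_eq_true]
        rw [ih [] (cur.reverse :: acc), ih [] [cur.reverse]]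
        simp
    · simp only [hs, if_false, Bool.false_eq_true]
      exact ih (c :: cur) acc

lemma pvDelim (c : Char) :
    PySem.Chars.isspace (pvRepl c) = (PySem.Chars.isspace c || c == ',' || c == '/') := by
  by_cases h1 : c = ','
  · subst h1; simp [pvRepl]; decide
  · by_cases h2 : c = '/'
    · subst h2; simp [pvRepl]; decide
    · have b1 : (c == ',') = false := by simp [h1]
      have b2 : (c == '/') = false := by simp [h2]
      simp [pvRepl, b1, b2]

lemma snStep_delim (st : List Int × Option Int) (c : Char)
    (h : (PySem.Chars.isspace c || c == ',' || c == '/') = true) :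
    snStep st c = (snFlush st.1 st.2, none) := by
  simp [snStep, h]

lemma snStep_nondelim (st : List Int × Option Int) (c : Char)
    (h : (PySem.Chars.isspace c || c == ',' || c == '/') = false) :
    snStep st c = (st.1, pvDstep st.2 c) := by
  by_cases hd : PySem.Chars.isdigit c <;> simp [snStep, h, pvDstep, hd]

lemma pvDigitsSome (w : List Char) : ∀ (n : Int),
    w.foldl pvDstep (some n)
      = some ((w.filter PySem.Chars.isdigit).foldl (fun m c => m * 10 + ((c.toNat : Int) - 48)) n) := by
  induction w with
  | nil => intro n; simp
  | cons c t ih =>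
    intro n
    by_cases hd : PySem.Chars.isdigit c
    · simp [List.foldl, pvDstep, hd, List.filter, ih]
    · simp [List.foldl, pvDstep, hd, List.filter, ih]

lemma pvDigitsNone (w : List Char) :
    w.foldl pvDstep none
      = if (w.filter PySem.Chars.isdigit).isEmpty then none
        else some (digitsToInt (w.filter PySem.Chars.isdigit)) := by
  induction w with
  | nil => simp
  | cons c t ih =>
    by_cases hd : PySem.Chars.isdigit c
    · simp only [List.foldl, pvDstep, hd, if_true, List.filter, Option.getD_none]
      rw [pvDigitsSome]
      simp [digitsToInt, List.foldl]
    · simpa [List.foldl, pvDstep, hd, List.filter] using ih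

lemma pvFlush (out : List Int) (w : List Char) :
    pvProcTok out w = snFlush out (w.foldl pvDstep none) := by
  rw [pvDigitsNone]
  by_cases h : (w.filter PySem.Chars.isdigit).isEmpty
  · simp [pvProcTok, snFlush, h]
  · simp [pvProcTok, snFlush, h]

lemma pvMain (cs : List Char) : ∀ (cur : List Char) (out : List Int),
    (PySem.Chars.split₀.go (cs.map pvRepl) cur []).foldl pvProcTok out
      = (fun st : List Int × Option Int => snFlush st.1 st.2)
          (cs.foldl snStep (out, cur.reverse.foldl pvDstep none)) := by
  induction cs with
  | nil =>
    intro cur out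
    by_cases h : cur.isEmpty
    · have : cur = [] := by simpa [List.isEmpty_iff] using h
      subst this
      simp [PySem.Chars.split₀.go, snFlush]
    · simp only [List.map_nil, PySem.Chars.split₀.go, h, if_false, Bool.false_eq_true,
        List.reverse_nil, List.foldl]
      simp [pvFlush]
  | cons c t ih =>
    intro cur out
    simp only [List.map_cons, List.foldl_cons]
    rw [PySem.Chars.split₀.go]
    by_cases hdel : (PySem.Chars.isspace c || c == ',' || c == '/') = true
    · rw [snStep_delim _ _ hdel]
      have hs : PySem.Chars.isspace (pvRepl c) = true := by rw [pvDelim]; exact hdel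
      rw [hs]
      simp only [if_true]
      by_cases h : cur.isEmpty
      · have : cur = [] := by simpa [List.isEmpty_iff] using h
        subst this
        simp only [List.isEmpty_nil, if_true, List.reverse_nil, List.foldl_nil]
        simpa using ih [] out
      · simp only [h, if_false, Bool.false_eq_true]
        rw [splitGo_acc _ [] [cur.reverse]]
        simp only [List.reverse_cons, List.reverse_nil, List.nil_append, List.singleton_append,
          List.foldl_cons]
        rw [pvFlush out cur.reverse]
        simpa using ih [] (snFlush out (cur.reverse.foldl pvDstep none))
    · have hdel' : (PySem.Chars.isspace c || c == ',' || c == '/') = false := by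
        cases hb : (PySem.Chars.isspace c || c == ',' || c == '/') with
        | false => rfl
        | true => exact absurd hb hdel
      rw [snStep_nondelim _ _ hdel']
      have hrc : pvRepl c = c := by
        unfold pvRepl
        have h1 : (c == ',') = false := by
          by_contra hx
          simp at hx
          simp [hx] at hdel'
        have h2 : (c == '/') = false := by
          by_contra hx
          simp at hx
          simp [hx] at hdel'
        simp [h1, h2]
      have hs : PySem.Chars.isspace (pvRepl c) = false := by rw [pvDelim]; exact hdel'
      rw [hs]
      simp only [if_false, Bool.false_eq_true, hrc]
      have := ih (c :: cur) out
      rw [this]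
      simp [List.foldl_append]

-- ===== VERDICT (by name: the statement is the Claim_ definition above) =====
theorem street_numbers_spec : Claim_equal_street_numbers := by
  intro address _
  unfold Spec_street_numbers
  unfold street_numbers street_numbers_alt
  by_cases h : address = ""
  · subst h
    decide
  · rw [if_neg h]
    rw [replace_single, replace_single, repl_compose]
    unfold PySem.Chars.split₀
    simpa using pvMain address.toList [] []
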